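-- pv_equiv track=rewrite | github.com/febryannnn/Komputasi-Numerik | method.py | _product_derivative_backward
-- ===== SOURCE A (Python) =====
-- def _product_derivative_backward(s, k):
--     """Derivative of product (s)(s+1)(s+2)...(s+(k-1)) w.r.t. s."""
--     if k == 0:
--         return 0
--     if k == 1:
--         return 1
--     total = 0
--     for i in range(k):
--         prod = 1
--         for j in range(k):
--             if j != i:
--                 prod *= s + j
--         total += prod
--     return total
-- ===== SOURCE B (Python) =====
-- def _product_derivative_backward(s, k):
--     """Derivative of product (s)(s+1)(s+2)...(s+(k-1)) w.r.t. s."""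
--     prod = 1
--     deriv = 0
--     for j in range(k):
--         deriv = deriv * (s + j) + prod
--         prod *= s + j
--     return deriv
-- ===== Notes on version B (the rewrite author's own statement) =====
-- stated objective: faster
-- what changed: Replaces the leave-one-out double loop (for each i, multiply all factors except the i-th) with a single product-rule pass that carries the running product and its derivative, so the inner scan disappears.
import Mathlib
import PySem

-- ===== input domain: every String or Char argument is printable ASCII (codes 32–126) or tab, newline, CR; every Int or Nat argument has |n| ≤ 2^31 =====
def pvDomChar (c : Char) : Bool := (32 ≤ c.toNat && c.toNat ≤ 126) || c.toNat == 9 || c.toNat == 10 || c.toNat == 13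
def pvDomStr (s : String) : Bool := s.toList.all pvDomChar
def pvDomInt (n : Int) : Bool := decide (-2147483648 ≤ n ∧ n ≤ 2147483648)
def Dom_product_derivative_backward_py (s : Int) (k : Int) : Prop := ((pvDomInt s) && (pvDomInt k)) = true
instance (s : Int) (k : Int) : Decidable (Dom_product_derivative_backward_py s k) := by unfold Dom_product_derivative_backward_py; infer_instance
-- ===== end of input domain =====

-- B replaces A's O(k^2) leave-one-out double loop by a single O(k) product-rule pass
-- carrying the running product and its derivative.

-- ===== PORT A =====
def product_derivative_backward_py (s : Int) (k : Int) : Int :=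
  if k == 0 then 0
  else if k == 1 then 1
  else
    (PySem.List.pyRange 0 k 1).foldl (fun total i =>
      total + (PySem.List.pyRange 0 k 1).foldl
        (fun prod j => if j != i then prod * (s + j) else prod) 1) 0

-- ===== PORT B =====
def product_derivative_backward_py_alt (s : Int) (k : Int) : Int :=
  ((PySem.List.pyRange 0 k 1).foldl
    (fun (pd : Int × Int) j => (pd.1 * (s + j), pd.2 * (s + j) + pd.1)) (1, 0)).2

-- ===== PRECONDITION & SPEC =====
def Spec_product_derivative_backward_py (s : Int) (k : Int) (out : Int) : Prop := out = product_derivative_backward_py_alt s k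
instance (s : Int) (k : Int) (out : Int) : Decidable (Spec_product_derivative_backward_py s k out) := by unfold Spec_product_derivative_backward_py; infer_instance

-- ===== CLAIM (what is proved, stated in full; the proofs are below) =====
def Claim_equal_product_derivative_backward_py : Prop := ∀ (s : Int) (k : Int), Dom_product_derivative_backward_py s k → Spec_product_derivative_backward_py s k (product_derivative_backward_py s k)

-- ===== LEMMAS AND PROOFS =====

/-- Running product (s)(s+1)...(s+n-1). -/
def pvProd (s : Int) : Nat → Int
  | 0 => 1
  | n+1 => pvProd s n * (s + n)

/-- Its derivative with respect to s. -/
def pvDeriv (s : Int) : Nat → Int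
  | 0 => 0
  | n+1 => pvDeriv s n * (s + n) + pvProd s n

/-- A's inner loop with a factor skipped at an index ≥ n skips nothing. -/
theorem pv_inner_full (s : Int) (n : Nat) (i : Int) (h : (n : Int) ≤ i) (c : Int) :
    (PySem.List.pyRange 0 n 1).foldl
      (fun prod j => if j != i then prod * (s + j) else prod) c = c * pvProd s n := by
  induction n generalizing c with
  | zero => simp [PySem.List.pyRange_one_eq_nil, pvProd]
  | succ n ih =>
    have hsr : PySem.List.pyRange 0 ((n:Int)+1) 1 = PySem.List.pyRange 0 n 1 ++ [(n:Int)] := by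
      simpa using PySem.List.pyRange_one_succ_right (a := 0) (b := (n:Int)) (by positivity)
    have hne : ((n:Int) != i) = true := by
      have : (n:Int) ≠ i := by push_cast at h; omega
      simpa using this
    have hn : ((n:Int)) ≤ i := by push_cast at h ⊢; omega
    rw [show ((n+1 : Nat) : Int) = (n:Int)+1 by push_cast; ring, hsr, List.foldl_append,
      ih hn c]
    simp only [List.foldl_cons, List.foldl_nil]
    rw [if_pos hne]
    simp [pvProd, mul_assoc]

/-- B's single pass computes the running (product, derivative) pair. -/
theorem pv_alt_fold (s : Int) (n : Nat) :
    (PySem.List.pyRange 0 n 1).foldl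
      (fun (pd : Int × Int) j => (pd.1 * (s + j), pd.2 * (s + j) + pd.1)) (1, 0)
      = (pvProd s n, pvDeriv s n) := by
  induction n with
  | zero => simp [PySem.List.pyRange_one_eq_nil, pvProd, pvDeriv]
  | succ n ih =>
    have hsr : PySem.List.pyRange 0 ((n:Int)+1) 1 = PySem.List.pyRange 0 n 1 ++ [(n:Int)] := by
      simpa using PySem.List.pyRange_one_succ_right (a := 0) (b := (n:Int)) (by positivity)
    rw [show ((n+1 : Nat) : Int) = (n:Int)+1 by push_cast; ring, hsr, List.foldl_append, ih]
    simp [pvProd, pvDeriv]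

/-- A's double loop computes the derivative of the product. -/
theorem pv_a_fold (s : Int) (n : Nat) :
    (PySem.List.pyRange 0 n 1).foldl (fun total i =>
      total + (PySem.List.pyRange 0 n 1).foldl
        (fun prod j => if j != i then prod * (s + j) else prod) 1) 0
      = pvDeriv s n := by
  induction n with
  | zero => simp [PySem.List.pyRange_one_eq_nil, pvDeriv]
  | succ n ih =>
    have hsr : PySem.List.pyRange 0 ((n:Int)+1) 1 = PySem.List.pyRange 0 n 1 ++ [(n:Int)] := by
      simpa using PySem.List.pyRange_one_succ_right (a := 0) (b := (n:Int)) (by positivity)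
    have hc : ((n+1 : Nat) : Int) = (n:Int)+1 := by push_cast; ring
    rw [hc, hsr]
    rw [PySem.List.foldl_add (g := fun i =>
      (PySem.List.pyRange 0 ((n:Int)) 1 ++ [(n:Int)]).foldl
        (fun prod j => if j != i then prod * (s + j) else prod) 1)]
    rw [PySem.List.foldl_add (g := fun i =>
      (PySem.List.pyRange 0 ((n:Int)) 1).foldl
        (fun prod j => if j != i then prod * (s + j) else prod) 1)] at ih
    simp only [List.map_append, List.sum_append, List.map_cons, List.map_nil]
    have hlast : (PySem.List.pyRange 0 ((n:Int)) 1 ++ [(n:Int)]).foldl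
        (fun prod j => if j != (n:Int) then prod * (s + j) else prod) 1 = pvProd s n := by
      rw [List.foldl_append, pv_inner_full s n (n:Int) le_rfl 1]
      simp
    have hmap : (PySem.List.pyRange 0 ((n:Int)) 1).map (fun i =>
        (PySem.List.pyRange 0 ((n:Int)) 1 ++ [(n:Int)]).foldl
          (fun prod j => if j != i then prod * (s + j) else prod) 1)
        = (PySem.List.pyRange 0 ((n:Int)) 1).map (fun i =>
          ((PySem.List.pyRange 0 ((n:Int)) 1).foldl
            (fun prod j => if j != i then prod * (s + j) else prod) 1) * (s + n)) := by
      apply List.map_congr_left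
      intro i hi
      have hi' : i < (n:Int) := (PySem.List.mem_pyRange_one.mp hi).2
      have hne : ((n:Int) != i) = true := by simpa using (by omega : (n:Int) ≠ i)
      rw [List.foldl_append]
      simp only [List.foldl_cons, List.foldl_nil]
      rw [if_pos hne]
    rw [hlast, hmap, List.sum_map_mul_right]
    simp only [zero_add] at ih
    simp only [List.sum_cons, List.sum_nil, zero_add, add_zero]
    rw [ih]
    simp [pvDeriv]

-- ===== VERDICT (by name: the statement is the Claim_ definition above) =====
theorem product_derivative_backward_py_spec : Claim_equal_product_derivative_backward_py := by
  intro s k _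
  unfold Spec_product_derivative_backward_py product_derivative_backward_py product_derivative_backward_py_alt
  rcases le_or_gt k 0 with hk | hk
  · rcases eq_or_lt_of_le hk with h0 | h0
    · subst h0; simp [PySem.List.pyRange_one_eq_nil]
    · have hnil : PySem.List.pyRange 0 k 1 = [] := PySem.List.pyRange_one_eq_nil (by omega)
      have h0 : (k == 0) = false := by simpa using (by omega : k ≠ 0)
      have h1 : (k == 1) = false := by simpa using (by omega : k ≠ 1)
      simp [hnil, h0, h1]
  · obtain ⟨n, rfl⟩ : ∃ n : Nat, k = (n : Int) := ⟨k.toNat, (Int.toNat_of_nonneg (by omega)).symm⟩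
    rw [pv_alt_fold s n]
    rcases Nat.eq_or_lt_of_le (by exact_mod_cast hk : 1 ≤ n) with h1 | h1
    · have : n = 1 := h1.symm
      subst this
      simp [pvDeriv, pvProd]
    · have h0 : (((n:Int)) == 0) = false := by simpa using (by omega : (n:Int) ≠ 0)
      have h1' : (((n:Int)) == 1) = false := by simpa using (by omega : (n:Int) ≠ 1)
      rw [if_neg (by simpa using (by omega : (n:Int) ≠ 0)),
          if_neg (by simpa using (by omega : (n:Int) ≠ 1)), pv_a_fold s n]
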